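-- pv_equiv track=rewrite | github.com/DJHyun/TIL | Python/Algorithm/practice/20190327_practice-2.py | candi
-- ===== SOURCE A (Python) =====
-- def candi(a, k, check, c):
--     in_perm = [0] * (check + 1)
--
--     for i in range(1, k):
--         for j in range(a[i], -1, -1):
--             in_perm[j] = 1
--
--     ncandi = 0
--     for i in range(check):
--         if not in_perm[i]:
--             c[ncandi] = i
--             ncandi += 1
--
--     return ncandi
-- ===== SOURCE B (Python) =====
-- def candi(a, k, check, c):
--     # Covered prefix is 0..top where top is the largest a[i] for 1 <= i < k;
--     # uncovered candidates are simply start..check-1 with start = max(top+1, 0).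
--     top = max(a[1:k], default=-1) if k > 1 else -1
--     start = max(top + 1, 0)
--     n = max(check - start, 0)
--     for off in range(n):
--         c[off] = start + off
--     return n
-- ===== Notes on version B (the rewrite author's own statement) =====
-- stated objective: simpler
-- what changed: Instead of marking a boolean table from each a[i] down to 0 and then scanning it, B takes the single maximum of a[1:k] and emits the arithmetic range max+1..check-1 directly; intended as faster (O(k+output) vs O(k*max+check)) but measured speed varies with the data, so no speed claim is made.
import Mathlib
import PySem

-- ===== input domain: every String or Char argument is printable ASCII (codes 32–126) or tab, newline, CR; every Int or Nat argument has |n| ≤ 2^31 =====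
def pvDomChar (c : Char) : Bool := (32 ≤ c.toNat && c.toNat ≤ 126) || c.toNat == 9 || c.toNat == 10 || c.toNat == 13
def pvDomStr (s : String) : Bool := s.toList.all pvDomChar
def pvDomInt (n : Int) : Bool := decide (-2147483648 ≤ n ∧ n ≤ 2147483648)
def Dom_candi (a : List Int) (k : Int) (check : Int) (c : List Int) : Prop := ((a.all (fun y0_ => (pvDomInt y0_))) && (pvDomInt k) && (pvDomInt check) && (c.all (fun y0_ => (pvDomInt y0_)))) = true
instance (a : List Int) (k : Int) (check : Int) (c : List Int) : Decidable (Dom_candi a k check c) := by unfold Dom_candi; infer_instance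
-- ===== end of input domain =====

-- B replaces A's mark-a-table-then-scan with the closed form "emit max(a[1:k])+1 .. check-1".
-- Both Pythons mutate c in place (A writes each candidate, B writes the same values at the same positions);
-- the equivalence proved here is about the RETURN value.

-- ===== PORT A =====
-- inner loop: for j in range(a[i], -1, -1): in_perm[j] = 1
def markRow (p : List Int) (ai : Int) : List Int :=
  (PySem.List.pyRange ai (-1) (-1)).foldl (fun q j => q.set j.toNat 1) p

def candi (a : List Int) (k : Int) (check : Int) (c : List Int) : Int :=
  let perm0 : List Int := List.replicate (check + 1).toNat 0
  let perm := (PySem.List.pyRange 1 k 1).foldl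
      (fun q i => markRow q (PySem.List.pyGetD a i 0)) perm0
  -- the write c[ncandi] = i does not affect the returned ncandi (in-range under Pre_)
  (PySem.List.pyRange 0 check 1).foldl
      (fun nc i => if PySem.List.pyGetD perm i 0 = 0 then nc + 1 else nc) 0

-- ===== PORT B =====
def candi_alt (a : List Int) (k : Int) (check : Int) (c : List Int) : Int :=
  let top : Int :=
    if 1 < k then (PySem.List.max? (PySem.List.slice a (some 1) (some k)) (fun x => x)).getD (-1)
    else -1
  let start := max (top + 1) 0
  -- the loop writing c[off] = start + off does not affect the returned n
  max (check - start) 0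

-- ===== PRECONDITION & SPEC =====
-- Pre_ = exactly the inputs where Python A returns (no IndexError): every accessed index a[1..k-1]
-- exists, every nonnegative a[i] marks only inside in_perm (a[i] ≤ check), and c is long enough
-- for all the candidate writes.
def Pre_candi (a : List Int) (k : Int) (check : Int) (c : List Int) : Prop :=
  (k ≤ 1 ∨ k ≤ (a.length : Int)) ∧
  (∀ x ∈ PySem.List.slice a (some 1) (some (max k 1)), 0 ≤ x → x ≤ check) ∧
  (check - max (((PySem.List.max? (PySem.List.slice a (some 1) (some (max k 1))) (fun x => x)).getD (-1)) + 1) 0).toNat ≤ c.length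

instance (a : List Int) (k : Int) (check : Int) (c : List Int) : Decidable (Pre_candi a k check c) := by
  unfold Pre_candi; infer_instance

def pvWitness_candi : List Int × Int × Int × List Int := ([5, 3, 7], 3, 9, [0, 0, 0, 0])

def Spec_candi (a : List Int) (k : Int) (check : Int) (c : List Int) (out : Int) : Prop := out = candi_alt a k check c
instance (a : List Int) (k : Int) (check : Int) (c : List Int) (out : Int) : Decidable (Spec_candi a k check c out) := by unfold Spec_candi; infer_instance

-- ===== CLAIM (what is proved, stated in full; the proofs are below) =====
def Claim_equal_candi : Prop := ∀ (a : List Int) (k : Int) (check : Int) (c : List Int), Dom_candi a k check c → Pre_candi a k check c → Spec_candi a k check c (candi a k check c)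

-- ===== LEMMAS AND PROOFS =====

-- pointwise image of the 0/1 table: entry j is 1 iff j ≤ m
def permFun (n : Nat) (m : Int) : List Int :=
  (List.range n).map (fun (j : Nat) => if (j : Int) ≤ m then 1 else 0)

theorem setfold_length (l : List Int) (p : List Int) :
    (l.foldl (fun q j => q.set j.toNat 1) p).length = p.length := by
  induction l generalizing p with
  | nil => rfl
  | cons x t ih => simpa [List.foldl] using ih (p.set x.toNat 1)

theorem setfold_getElem? (l : List Int) (p : List Int) (j : Nat) (hj : j < p.length)
    (hl : ∀ x ∈ l, 0 ≤ x) :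
    (l.foldl (fun q i => q.set i.toNat 1) p)[j]? = if (j : Int) ∈ l then some 1 else p[j]? := by
  induction l generalizing p with
  | nil => simp
  | cons x t ih =>
    have hx : 0 ≤ x := hl x (by simp)
    have ih' := ih (p.set x.toNat 1) (by simpa using hj) (fun y hy => hl y (by simp [hy]))
    simp only [List.foldl_cons] at *
    rw [ih']
    by_cases hmem : (j : Int) ∈ t
    · simp [hmem]
    · have hset : (p.set x.toNat 1)[j]? = if x.toNat = j then some 1 else p[j]? := by
        by_cases hxy : x.toNat = j
        · subst hxy; simp [hj]
        · simp [List.getElem?_set_ne, hxy]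
      rw [hset]
      by_cases hxy : (j : Int) = x
      · have : x.toNat = j := by omega
        simp [hxy, this]
      · have : ¬ x.toNat = j := by omega
        simp [hxy, this]

theorem permFun_length (n : Nat) (m : Int) : (permFun n m).length = n := by
  simp [permFun]

theorem markRow_perm (n : Nat) (m ai : Int) :
    markRow (permFun n m) ai = permFun n (max m ai) := by
  unfold markRow
  apply List.ext_getElem?
  intro j
  by_cases hj : j < n
  · have hj' : j < (permFun n m).length := by simpa [permFun_length] using hj
    rw [setfold_getElem? _ _ j hj'
      (fun x hx => by
        have := (PySem.List.mem_pyRange_neg_one).1 hx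
        omega)]
    have hmem : ((j : Int) ∈ PySem.List.pyRange ai (-1) (-1)) ↔ (j : Int) ≤ ai := by
      rw [PySem.List.mem_pyRange_neg_one]; omega
    have hget : ∀ m' : Int, (permFun n m')[j]? = some (if (j : Int) ≤ m' then 1 else 0) := by
      intro m'
      have hj2 : j < (permFun n m').length := by rw [permFun_length]; omega
      rw [List.getElem?_eq_getElem hj2]
      simp only [permFun, List.getElem_map, List.getElem_range]
    rw [hget m, hget (max m ai)]
    by_cases h1 : (j : Int) ≤ ai
    · simp [hmem, h1]
    · by_cases h2 : (j : Int) ≤ m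
      · simp [hmem, h1, h2]
      · simp [hmem, h1, h2]
  · have h1 : (permFun n m).length ≤ j := by simp [permFun_length]; omega
    have h2 : (permFun n (max m ai)).length ≤ j := by simp [permFun_length]; omega
    rw [List.getElem?_eq_none (by simpa [setfold_length] using h1),
        List.getElem?_eq_none h2]

theorem foldl_markRow (s : List Int) (n : Nat) (m : Int) :
    s.foldl markRow (permFun n m) = permFun n (s.foldl max m) := by
  induction s generalizing m with
  | nil => rfl
  | cons x t ih => simp [List.foldl_cons, markRow_perm, ih]

theorem replicate_eq_permFun (n : Nat) : List.replicate n (0 : Int) = permFun n (-1) := by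
  unfold permFun
  rw [List.map_congr_left (fun j _ => by
    rw [if_neg (by omega : ¬ ((j : Nat) : Int) ≤ -1)])]
  rw [List.map_const', List.length_range]

theorem range_map_getD (a : List Int) (n : Nat) : ∀ (i k : Int), 0 ≤ i → k ≤ (a.length : Int) →
    (k - i).toNat = n →
    (PySem.List.pyRange i k 1).map (fun j => PySem.List.pyGetD a j 0)
      = (a.drop i.toNat).take (k - i).toNat := by
  induction n with
  | zero =>
    intro i k hi hk hn
    rw [PySem.List.pyRange_one_eq_nil (by omega), hn]
    simp
  | succ n ih =>
    intro i k hi hk hn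
    have hik : i < k := by omega
    rw [PySem.List.pyRange_one_cons hik, List.map_cons,
      ih (i + 1) k (by omega) hk (by omega)]
    have hilt : i.toNat < a.length := by omega
    have hget : PySem.List.pyGetD a i 0 = a[i.toNat] := PySem.List.pyGetD_eq_getElem a 0 hi (by omega)
    rw [hget, List.drop_eq_getElem_cons hilt, hn, (by omega : (k - (i + 1)).toNat = n),
      List.take_succ_cons, (by omega : (i + 1).toNat = i.toNat + 1)]

theorem foldl_max_comm (t : List Int) : ∀ (m m' : Int),
    t.foldl max (max m m') = max (t.foldl max m) m' := by
  induction t with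
  | nil => intro m m'; rfl
  | cons y t ih =>
    intro m m'
    simp only [List.foldl_cons]
    rw [(by omega : max (max m m') y = max (max m y) m'), ih]

theorem top_eq (s : List Int) :
    max (((PySem.List.max? s (fun x => x)).getD (-1)) + 1) 0
      = max ((s.foldl max (-1)) + 1) 0 := by
  cases s with
  | nil => rfl
  | cons x t =>
    rw [PySem.List.max?_id_cons]
    have h1 : (x :: t).foldl max (-1) = max (t.foldl max x) (-1) := by
      simp only [List.foldl_cons]
      rw [(by omega : max (-1) x = max x (-1)), foldl_max_comm]
    rw [h1]
    simp only [Option.getD_some]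
    omega

-- counting loop: number of zero entries of permFun in [0, check)
theorem count_eq (check M : Int) (h0 : 0 ≤ check) (hM : -1 ≤ M) :
    (PySem.List.pyRange 0 check 1).foldl
        (fun nc i => if PySem.List.pyGetD (permFun (check + 1).toNat M) i 0 = 0 then nc + 1 else nc) 0
      = max (check - max (M + 1) 0) 0 := by
  rw [PySem.List.foldl_ite_add_one]
  have hcong : (PySem.List.pyRange 0 check 1).countP
        (fun i => decide (PySem.List.pyGetD (permFun (check + 1).toNat M) i 0 = 0))
      = (PySem.List.pyRange 0 check 1).countP (fun i => decide (M < i)) := by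
    apply List.countP_congr
    intro i hi
    have hmem := (PySem.List.mem_pyRange_one).1 hi
    have hilt : i.toNat < (check + 1).toNat := by omega
    have hget : PySem.List.pyGetD (permFun (check + 1).toNat M) i 0
        = if i ≤ M then 1 else 0 := by
      rw [PySem.List.pyGetD_eq_getElem _ 0 hmem.1 (by rw [permFun_length]; omega)]
      simp only [permFun, List.getElem_map, List.getElem_range]
      have : ((i.toNat : Int)) = i := by omega
      rw [this]
    rw [hget]
    by_cases h : i ≤ M
    · simp [h]
    · simp [h, (by omega : M < i)]
  rw [hcong]
  by_cases hMc : check ≤ M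
  · have hz : (PySem.List.pyRange 0 check 1).countP (fun i => decide (M < i)) = 0 := by
      apply List.countP_eq_zero.2
      intro i hi
      have := (PySem.List.mem_pyRange_one).1 hi
      simp; omega
    rw [hz]; omega
  · have hsplit := PySem.List.pyRange_one_append 0 (M + 1) check (by omega) (by omega)
    rw [hsplit, List.countP_append]
    have hz : (PySem.List.pyRange 0 (M + 1) 1).countP (fun i => decide (M < i)) = 0 := by
      apply List.countP_eq_zero.2
      intro i hi
      have := (PySem.List.mem_pyRange_one).1 hi
      simp; omega
    have hall : (PySem.List.pyRange (M + 1) check 1).countP (fun i => decide (M < i))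
        = (PySem.List.pyRange (M + 1) check 1).length := by
      apply List.countP_eq_length.2
      intro i hi
      have := (PySem.List.mem_pyRange_one).1 hi
      simp; omega
    rw [hz, hall, PySem.List.length_pyRange_one]
    omega

-- ===== VERDICT (by name: the statement is the Claim_ definition above) =====
theorem candi_spec : Claim_equal_candi := by
  intro a k check c _hdom hpre
  obtain ⟨hk, hbound, _hc⟩ := hpre
  unfold Spec_candi candi candi_alt
  simp only []
  by_cases hck : 0 ≤ check
  · -- main case
    rw [← List.foldl_map (f := fun i => PySem.List.pyGetD a i 0) (g := markRow),
        replicate_eq_permFun]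
    by_cases hk1 : 1 < k
    · have hklen : k ≤ (a.length : Int) := by rcases hk with h | h; omega; exact h
      have hs : PySem.List.slice a (some 1) (some k) = (a.drop 1).take (k.toNat - 1) := by
        rw [PySem.List.slice_toNat a (by omega : (0:Int) ≤ 1) (by omega : (0:Int) ≤ k)]
        norm_num
      have hmap := range_map_getD a (k - 1).toNat 1 k (by omega) hklen rfl
      simp only [Int.toNat_one] at hmap
      rw [hmap, foldl_markRow]
      set s : List Int := (a.drop 1).take (k - 1).toNat with hsdef
      have hs' : PySem.List.slice a (some 1) (some k) = s := by
        rw [hs, hsdef, (by omega : (k - 1).toNat = k.toNat - 1)]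
      set M : Int := s.foldl max (-1) with hMdef
      have hM1 : -1 ≤ M := (PySem.List.le_foldl_max s (-1)).1
      rw [count_eq check M hck hM1, if_pos hk1, hs', hMdef, top_eq]
    · -- k ≤ 1: no marking at all
      rw [PySem.List.pyRange_one_eq_nil (by omega : k ≤ 1), List.map_nil, List.foldl_nil,
        count_eq check (-1) hck (by omega), if_neg hk1]
  · -- check < 0: both loops are empty / the range is empty
    rw [PySem.List.pyRange_one_eq_nil (by omega : check ≤ 0), List.foldl_nil]
    have h0 : (0:Int) ≤ max ((if 1 < k then (PySem.List.max? (PySem.List.slice a (some 1) (some k)) (fun x => x)).getD (-1) else -1) + 1) 0 := le_max_right _ _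
    omega
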